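-- pv_equiv track=rewrite | github.com/aryasohani/backend_leads | scoring.py | industry_score
-- ===== SOURCE A (Python) =====
-- def industry_score(lead_industry: str, offer_use_cases: list) -> (int, str):
--     li = lead_industry.lower()
--     for icp in offer_use_cases:
--         icp_l = icp.lower()
--         if li == icp_l:
--             return 20, f"Exact industry/ICP match: {icp}"
--     for icp in offer_use_cases:
--         if icp.lower() in li or li in icp.lower():
--             return 10, f"Adjacent industry match with: {icp}"
--     return 0, "Industry not matched"
-- ===== SOURCE B (Python) =====
-- def industry_score(lead_industry: str, offer_use_cases: list) -> (int, str):
--     li = lead_industry.lower()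
--     adjacent = None
--     for icp in offer_use_cases:
--         icp_l = icp.lower()
--         if li == icp_l:
--             return 20, f"Exact industry/ICP match: {icp}"
--         if adjacent is None and (icp_l in li or li in icp_l):
--             adjacent = icp
--     if adjacent is not None:
--         return 10, f"Adjacent industry match with: {adjacent}"
--     return 0, "Industry not matched"
-- ===== Notes on version B (the rewrite author's own statement) =====
-- stated objective: alternative
-- what changed: Replaces A's two passes over offer_use_cases (one for exact matches, a second for substring matches) with a single pass that records the first adjacent candidate while still letting a later exact match win.
import Mathlib
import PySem

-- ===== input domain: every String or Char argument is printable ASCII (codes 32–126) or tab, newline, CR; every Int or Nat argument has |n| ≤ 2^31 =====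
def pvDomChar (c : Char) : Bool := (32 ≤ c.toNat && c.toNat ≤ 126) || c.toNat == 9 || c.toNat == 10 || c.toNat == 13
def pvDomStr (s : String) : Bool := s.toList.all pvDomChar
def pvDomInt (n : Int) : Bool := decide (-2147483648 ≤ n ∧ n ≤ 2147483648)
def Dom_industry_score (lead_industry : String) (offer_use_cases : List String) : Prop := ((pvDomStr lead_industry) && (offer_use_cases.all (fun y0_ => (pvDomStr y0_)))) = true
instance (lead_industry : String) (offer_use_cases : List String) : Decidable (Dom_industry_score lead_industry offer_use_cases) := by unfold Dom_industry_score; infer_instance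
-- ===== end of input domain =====

-- B replaces A's two passes over offer_use_cases with a single pass that records the first adjacent candidate while still letting a later exact match win.


-- ===== PORT A =====
def aExactLoop (li : String) : List String → Option (Int × String)
  | [] => none
  | icp :: rest =>
      if li == PySem.Str.lower icp then some (20, "Exact industry/ICP match: " ++ icp)
      else aExactLoop li rest

def aAdjLoop (li : String) : List String → Option (Int × String)
  | [] => none
  | icp :: rest =>
      if PySem.Str.isIn (PySem.Str.lower icp) li || PySem.Str.isIn li (PySem.Str.lower icp) then
        some (10, "Adjacent industry match with: " ++ icp)
      else aAdjLoop li rest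

def industry_score (lead_industry : String) (offer_use_cases : List String) : Int × String :=
  let li := PySem.Str.lower lead_industry
  match aExactLoop li offer_use_cases with
  | some r => r
  | none =>
    match aAdjLoop li offer_use_cases with
    | some r => r
    | none => (0, "Industry not matched")

-- ===== PORT B =====
def bLoop (li : String) (adjacent : Option String) : List String → Int × String
  | [] =>
      match adjacent with
      | some c => (10, "Adjacent industry match with: " ++ c)
      | none => (0, "Industry not matched")
  | icp :: rest =>
      let icp_l := PySem.Str.lower icp
      if li == icp_l then (20, "Exact industry/ICP match: " ++ icp)
      else if adjacent.isNone && (PySem.Str.isIn icp_l li || PySem.Str.isIn li icp_l) then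
        bLoop li (some icp) rest
      else bLoop li adjacent rest

def industry_score_alt (lead_industry : String) (offer_use_cases : List String) : Int × String :=
  bLoop (PySem.Str.lower lead_industry) none offer_use_cases

-- ===== PRECONDITION & SPEC =====
def Spec_industry_score (lead_industry : String) (offer_use_cases : List String) (out : Int × String) : Prop := out = industry_score_alt lead_industry offer_use_cases
instance (lead_industry : String) (offer_use_cases : List String) (out : Int × String) : Decidable (Spec_industry_score lead_industry offer_use_cases out) := by unfold Spec_industry_score; infer_instance

-- ===== CLAIM (what is proved, stated in full; the proofs are below) =====
def Claim_equal_industry_score : Prop := ∀ (lead_industry : String) (offer_use_cases : List String), Dom_industry_score lead_industry offer_use_cases → Spec_industry_score lead_industry offer_use_cases (industry_score lead_industry offer_use_cases)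

-- ===== LEMMAS AND PROOFS =====
-- ===== VERDICT (by name: the statement is the Claim_ definition above) =====
theorem bLoop_eq (li : String) (xs : List String) : ∀ adjacent : Option String,
    bLoop li adjacent xs =
      match aExactLoop li xs with
      | some r => r
      | none =>
        match adjacent with
        | some c => (10, "Adjacent industry match with: " ++ c)
        | none =>
          match aAdjLoop li xs with
          | some r => r
          | none => (0, "Industry not matched") := by
  induction xs with
  | nil => intro adjacent; cases adjacent <;> rfl
  | cons icp rest ih =>
    intro adjacent
    by_cases hx : (li == PySem.Str.lower icp) = true
    · simp [bLoop, aExactLoop, hx]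
    · by_cases ha : (PySem.Str.isIn (PySem.Str.lower icp) li || PySem.Str.isIn li (PySem.Str.lower icp)) = true
      · cases adjacent with
        | none =>
          simp only [bLoop, aExactLoop, aAdjLoop, hx, ha, Option.isNone_none, Bool.true_and,
            if_true, if_false, Bool.false_eq_true, ih]
        | some c =>
          simp only [bLoop, aExactLoop, hx, ha, Option.isNone_some, Bool.false_and,
            if_false, Bool.false_eq_true, ih]
      · cases adjacent with
        | none =>
          simp only [bLoop, aExactLoop, aAdjLoop, hx, ha, Bool.and_false, if_false,
            Bool.false_eq_true, Option.isNone_none, ih]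
        | some c =>
          simp only [bLoop, aExactLoop, aAdjLoop, hx, ha, Option.isNone_some, Bool.false_and,
            if_false, Bool.false_eq_true, ih]

theorem industry_score_spec : Claim_equal_industry_score := by
  intro lead_industry offer_use_cases _
  unfold Spec_industry_score industry_score industry_score_alt
  rw [bLoop_eq]
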